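-- pv_equiv track=rewrite | github.com/ClarkieUK/Gravity-Simulation | testing.py | largest_consecutive_sum
-- ===== SOURCE A (Python) =====
-- def largest_consecutive_sum(nums, n):
--     if n > len(nums):
--         return None
--
--     max_sum = float('-inf')
--     current_sum = 0
--
--     for i in range(len(nums)):
--         if i >= n:
--             current_sum -= nums[i - n]
--         current_sum += nums[i]
--
--         if current_sum > max_sum and i >= n - 1:
--             max_sum = current_sum
--
--     return max_sum
-- ===== SOURCE B (Python) =====
-- def largest_consecutive_sum(nums, n):
--     if n > len(nums):
--         return None
--     return max(sum(nums[i:i+n]) for i in range(len(nums) - n + 1))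
-- ===== Notes on version B (the rewrite author's own statement) =====
-- stated objective: simpler
-- what changed: Replaces the incremental add/subtract sliding window with running max and a float('-inf') sentinel by a one-line max over freshly recomputed slice sums, one per start index.
-- outside the precondition, e.g. on largest_consecutive_sum([], 0): A returns -inf, B returns 0; on largest_consecutive_sum([], -2): A returns -inf, B returns 0; on largest_consecutive_sum([2], -1): A raises IndexError, B returns 0
import Mathlib
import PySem

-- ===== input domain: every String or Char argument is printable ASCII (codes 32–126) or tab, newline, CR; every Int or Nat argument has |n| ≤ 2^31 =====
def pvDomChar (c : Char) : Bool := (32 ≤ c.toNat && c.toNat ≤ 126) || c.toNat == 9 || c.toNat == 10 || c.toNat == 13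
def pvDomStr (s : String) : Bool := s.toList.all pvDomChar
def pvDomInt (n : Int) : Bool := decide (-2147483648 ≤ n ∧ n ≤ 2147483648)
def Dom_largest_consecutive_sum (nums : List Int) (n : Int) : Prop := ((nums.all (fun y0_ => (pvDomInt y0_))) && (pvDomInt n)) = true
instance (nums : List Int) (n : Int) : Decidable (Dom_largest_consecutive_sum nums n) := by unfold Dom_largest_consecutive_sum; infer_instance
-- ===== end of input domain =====

-- B replaces A's incremental add/subtract sliding window (with a float('-inf') sentinel and a
-- running max) by a plain max over freshly recomputed window sums, one slice per start index:
-- simpler, not faster. Pre_ excludes inputs where A raises (n < 0, non-empty list: IndexError)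
-- or returns float('-inf'), which is not an Int (empty list with n ≤ 0).


-- ===== PORT A =====
-- max_sum : Option Int, none = the float('-inf') sentinel (Python returns that float only
-- outside Pre_). nums[i-n] / nums[i] are in range on every input Pre_ admits, so pyGetD 0 is
-- exact there; out-of-range access (n < 0, non-empty list) is a Python IndexError, outside Pre_.
def largest_consecutive_sum (nums : List Int) (n : Int) : Option Int :=
  if n > (nums.length : Int) then none
  else
    ((PySem.List.pyRange 0 (nums.length : Int) 1).foldl
      (fun (s : Option Int × Int) (i : Int) =>
        let c1 : Int := if i ≥ n then s.2 - PySem.List.pyGetD nums (i - n) 0 else s.2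
        let cur : Int := c1 + PySem.List.pyGetD nums i 0
        let mx : Option Int :=
          match s.1 with
          | none => if i ≥ n - 1 then some cur else none
          | some m => if cur > m ∧ i ≥ n - 1 then some cur else some m
        (mx, cur)) ((none : Option Int), (0 : Int))).1

-- ===== PORT B =====
def largest_consecutive_sum_alt (nums : List Int) (n : Int) : Option Int :=
  if n > (nums.length : Int) then none
  else
    PySem.List.max?
      ((PySem.List.pyRange 0 ((nums.length : Int) - n + 1) 1).map
        (fun i => (PySem.List.slice nums (some i) (some (i + n))).sum))
      (fun y => y)

-- ===== PRECONDITION & SPEC =====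
-- Pre_ excludes n < 0 (A raises IndexError on a non-empty list, returns float('-inf') on [])
-- and n = 0 with an empty list (A returns float('-inf'), which is not an Int).
def Pre_largest_consecutive_sum (nums : List Int) (n : Int) : Prop :=
  0 ≤ n ∧ (n = 0 → nums ≠ [])
instance (nums : List Int) (n : Int) : Decidable (Pre_largest_consecutive_sum nums n) := by
  unfold Pre_largest_consecutive_sum; infer_instance

def pvWitness_largest_consecutive_sum : List Int × Int := ([1, -2, 3, 4], 2)

def Spec_largest_consecutive_sum (nums : List Int) (n : Int) (out : Option Int) : Prop := out = largest_consecutive_sum_alt nums n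
instance (nums : List Int) (n : Int) (out : Option Int) : Decidable (Spec_largest_consecutive_sum nums n out) := by unfold Spec_largest_consecutive_sum; infer_instance

-- ===== CLAIM (what is proved, stated in full; the proofs are below) =====
def Claim_equal_largest_consecutive_sum : Prop := ∀ (nums : List Int) (n : Int), Dom_largest_consecutive_sum nums n → Pre_largest_consecutive_sum nums n → Spec_largest_consecutive_sum nums n (largest_consecutive_sum nums n)


-- ===== LEMMAS AND PROOFS =====

def pvW (nums : List Int) (k j : Nat) : Int := ((nums.drop j).take k).sum
def pvRunMax (nums : List Int) (k : Nat) : Nat → Int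
  | 0 => pvW nums k 0
  | m + 1 => max (pvRunMax nums k m) (pvW nums k (m + 1))

theorem pvFoldMax (nums : List Int) (k : Nat) : ∀ m : Nat,
    ((List.range m).map (fun j => pvW nums k (j + 1))).foldl max (pvW nums k 0)
      = pvRunMax nums k m := by
  intro m
  induction m with
  | zero => simp [pvRunMax]
  | succ m ih => rw [List.range_succ]; simp [List.foldl_append, ih, pvRunMax]

theorem pvB_max (nums : List Int) (k : Nat) (m : Nat) :
    PySem.List.max? ((List.range (m + 1)).map (fun j => pvW nums k j)) (fun y => y)
      = some (pvRunMax nums k m) := by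
  rw [List.range_succ_eq_map]
  simp only [List.map_cons, List.map_map]
  rw [PySem.List.max?_id_cons]
  rw [show ((fun j => pvW nums k j) ∘ Nat.succ) = (fun j => pvW nums k (j+1)) from rfl]
  rw [pvFoldMax]

theorem pvW_slide (nums : List Int) (k j : Nat) (hk : 1 ≤ k) (h : j + k < nums.length) :
    pvW nums k (j + 1)
      = pvW nums k j - PySem.List.pyGetD nums (j : Int) 0
          + PySem.List.pyGetD nums ((j : Int) + k) 0 := by
  have hS : ∀ a b : Nat, ((nums.drop a).take b).sum
      = (nums.take (a + b)).sum - (nums.take a).sum := by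
    intro a b
    rw [List.take_add, List.sum_append]; ring
  have hj : j < nums.length := by omega
  rw [show (j : Int) + ((k : Nat) : Int) = ((j + k : Nat) : Int) by push_cast; ring]
  rw [PySem.List.pyGetD_natCast, PySem.List.pyGetD_natCast]
  unfold pvW
  rw [hS (j + 1) k, hS j k]
  rw [show j + 1 + k = (j + k) + 1 by omega]
  rw [List.sum_take_succ _ _ h, List.sum_take_succ _ _ hj]
  rw [List.getD_eq_getElem _ _ hj, List.getD_eq_getElem _ _ h]
  ring

def pvStep (nums : List Int) (n : Int) (s : Option Int × Int) (i : Int) : Option Int × Int :=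
  let c1 : Int := if i ≥ n then s.2 - PySem.List.pyGetD nums (i - n) 0 else s.2
  let cur : Int := c1 + PySem.List.pyGetD nums i 0
  let mx : Option Int :=
    match s.1 with
    | none => if i ≥ n - 1 then some cur else none
    | some m => if cur > m ∧ i ≥ n - 1 then some cur else some m
  (mx, cur)

theorem pvInv (nums : List Int) (k : Nat) (hk : 1 ≤ k) : ∀ m : Nat, m ≤ nums.length →
    (PySem.List.pyRange 0 (m : Int) 1).foldl (pvStep nums (k : Int)) (none, 0)
      = if m < k then ((none : Option Int), (nums.take m).sum)
        else (some (pvRunMax nums k (m - k)), pvW nums k (m - k)) := by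
  intro m
  induction m with
  | zero =>
    intro _
    rw [if_pos (by omega)]
    simp [PySem.List.pyRange_one_eq_nil]
  | succ m ih =>
    intro hm1
    have hmL : m < nums.length := by omega
    rw [show ((m + 1 : Nat) : Int) = (m : Int) + 1 by push_cast; ring]
    rw [PySem.List.pyRange_one_succ_right (by positivity)]
    rw [List.foldl_append, ih (by omega)]
    by_cases hc : m + 1 < k
    · -- still filling the first window, max not yet set
      rw [if_pos (by omega), if_pos hc]
      unfold pvStep
      simp only [List.foldl_cons, List.foldl_nil]
      have hA : ¬ ((m : Int) ≥ (k : Int)) := by omega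
      have hB : ¬ ((m : Int) ≥ (k : Int) - 1) := by omega
      rw [if_neg hA, if_neg hB]
      simp [PySem.List.pyGetD_natCast, List.sum_take_succ _ _ hmL,
            List.getElem?_eq_getElem hmL]
    · by_cases he : m + 1 = k
      · -- first window completes: max_sum set for the first time
        rw [if_pos (by omega), if_neg (by omega)]
        unfold pvStep
        simp only [List.foldl_cons, List.foldl_nil]
        have hA : ¬ ((m : Int) ≥ (k : Int)) := by omega
        have hB : ((m : Int) ≥ (k : Int) - 1) := by omega
        rw [if_neg hA, if_pos hB]
        have h0 : m + 1 - k = 0 := by omega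
        rw [h0]
        simp [pvRunMax, pvW, PySem.List.pyGetD_natCast,
              List.sum_take_succ _ _ hmL, List.getElem?_eq_getElem hmL, ← he]
      · -- sliding window step
        have hkm : k ≤ m := by omega
        rw [if_neg (by omega), if_neg (by omega)]
        unfold pvStep
        simp only [List.foldl_cons, List.foldl_nil]
        have hA : ((m : Int) ≥ (k : Int)) := by omega
        rw [if_pos hA]
        have hslide := pvW_slide nums k (m - k) hk (by omega)
        have hidx1 : ((m : Int) - (k : Int)) = (((m - k : Nat)) : Int) := by omega
        have hidx2 : (((m - k : Nat)) : Int) + (k : Int) = (m : Int) := by omega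
        rw [hidx2] at hslide
        have hcur : pvW nums k (m - k) - PySem.List.pyGetD nums ((m : Int) - (k : Int)) 0
            + PySem.List.pyGetD nums ((m : Int)) 0 = pvW nums k (m - k + 1) := by
          rw [hidx1, hslide]
        rw [hcur]
        have hsub : m + 1 - k = (m - k) + 1 := by omega
        rw [hsub]
        simp only [pvRunMax]
        have hB : ((m : Int) ≥ (k : Int) - 1) := by omega
        rcases lt_or_ge (pvRunMax nums k (m - k)) (pvW nums k (m - k + 1)) with hlt | hge
        · rw [if_pos ⟨hlt, hB⟩]
          rw [max_eq_right (le_of_lt hlt)]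
        · rw [if_neg (fun hcon => absurd hcon.1 (not_lt.mpr hge))]
          rw [max_eq_left hge]

theorem pvInv0 (nums : List Int) : ∀ m : Nat,
    (PySem.List.pyRange 0 (m : Int) 1).foldl (pvStep nums 0) (none, 0)
      = ((if m = 0 then none else some 0 : Option Int), (0 : Int)) := by
  intro m
  induction m with
  | zero => simp [PySem.List.pyRange_one_eq_nil]
  | succ m ih =>
    rw [show ((m + 1 : Nat) : Int) = (m : Int) + 1 by push_cast; ring]
    rw [PySem.List.pyRange_one_succ_right (by positivity)]
    rw [List.foldl_append, ih]
    unfold pvStep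
    simp only [List.foldl_cons, List.foldl_nil]
    rw [if_pos (by omega : ((m : Int) ≥ 0))]
    by_cases h0 : m = 0
    · subst h0; norm_num
    · rw [if_neg h0]
      simp

theorem pvAltVal (nums : List Int) (n : Int) (hn : 0 ≤ n) (hle : ¬ n > (nums.length : Int)) :
    largest_consecutive_sum_alt nums n
      = some (pvRunMax nums n.toNat (nums.length - n.toNat)) := by
  obtain ⟨k, rfl⟩ : ∃ k : Nat, n = (k : Int) := ⟨n.toNat, by omega⟩
  unfold largest_consecutive_sum_alt
  rw [if_neg hle]
  simp only [Int.toNat_natCast]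
  have h1 : (nums.length : Int) - (k : Int) + 1 = ((nums.length - k + 1 : Nat) : Int) := by
    push_cast; omega
  rw [h1]
  rw [show nums.length - k + 1 = (nums.length - k) + 1 from rfl]
  rw [← pvB_max nums k (nums.length - k)]
  congr 1
  rw [PySem.List.pyRange_one]
  simp only [Int.sub_zero, Int.toNat_natCast, List.map_map]
  apply List.map_congr_left
  intro j hj
  simp only [Function.comp]
  rw [show (0 : Int) + (j : Int) = (j : Int) by ring]
  rw [PySem.List.slice_natCast_add]
  simp [pvW]

theorem pvRunMax_zero (nums : List Int) : ∀ m : Nat, pvRunMax nums 0 m = 0 := by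
  intro m
  induction m with
  | zero => simp [pvRunMax, pvW]
  | succ m ih => simp [pvRunMax, pvW, ih]

theorem pvMain (nums : List Int) (n : Int) (hPre : 0 ≤ n ∧ (n = 0 → nums ≠ [])) :
    (if n > (nums.length : Int) then none
     else
      ((PySem.List.pyRange 0 (nums.length : Int) 1).foldl (pvStep nums n) (none, 0)).1)
      = largest_consecutive_sum_alt nums n := by
  by_cases hgt : n > (nums.length : Int)
  · rw [if_pos hgt]
    unfold largest_consecutive_sum_alt
    rw [if_pos hgt]
  · rw [if_neg hgt, pvAltVal nums n hPre.1 hgt]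
    obtain ⟨k, rfl⟩ : ∃ k : Nat, n = (k : Int) := ⟨n.toNat, by omega⟩
    simp only [Int.toNat_natCast]
    by_cases hk0 : k = 0
    · subst hk0
      have hL : nums.length ≠ 0 := by
        have := hPre.2 rfl
        simpa [List.length_eq_zero_iff] using this
      rw [show ((0 : Nat) : Int) = (0 : Int) from rfl, pvInv0 nums nums.length]
      rw [pvRunMax_zero]
      simp [hL]
    · have hkL : k ≤ nums.length := by omega
      rw [pvInv nums k (by omega) nums.length le_rfl]
      rw [if_neg (by omega)]

-- ===== VERDICT (by name: the statement is the Claim_ definition above) =====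
theorem largest_consecutive_sum_spec : Claim_equal_largest_consecutive_sum := by
  intro nums n _ hPre
  unfold Spec_largest_consecutive_sum largest_consecutive_sum
  exact pvMain nums n hPre
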